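-- pv_equiv track=rewrite | github.com/eve-liya/assignment1-basics | ece496b_basics/tokenizer.py | _update
-- ===== SOURCE A (Python) =====
-- from typing import List, Dict, Tuple, Iterable, Iterator, Optional
--
-- def _update(ids: List[int], pair: Tuple[int, int], new_id: int) -> List[int]:
--     new_ids = []
--     i = 0
--     while i < len(ids):
--         curr_pair = tuple(ids[i:i+2])
--         if curr_pair == pair:
--             new_ids.append(new_id)
--             i += 2
--         else:
--             new_ids.append(ids[i])
--             i += 1
--     return new_ids
-- ===== SOURCE B (Python) =====
-- def _update(ids, pair, new_id):
--     # One flat pass with a one-element pending buffer instead of index arithmetic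
--     # and slicing: same greedy left-to-right non-overlapping merge.
--     out = []
--     pend = None
--     for x in ids:
--         if pend is None:
--             pend = x
--         elif (pend, x) == pair:
--             out.append(new_id)
--             pend = None
--         else:
--             out.append(pend)
--             pend = x
--     if pend is not None:
--         out.append(pend)
--     return out
-- ===== Notes on version B (the rewrite author's own statement) =====
-- stated objective: simpler
-- what changed: Replaced A's index-and-slice while-loop (tuple(ids[i:i+2]) comparison with i advancing by 1 or 2) by a single uniform for-loop over the elements carrying a one-element pending buffer, appending the merged id when (pend, x) equals the pair.
import Mathlib
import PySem

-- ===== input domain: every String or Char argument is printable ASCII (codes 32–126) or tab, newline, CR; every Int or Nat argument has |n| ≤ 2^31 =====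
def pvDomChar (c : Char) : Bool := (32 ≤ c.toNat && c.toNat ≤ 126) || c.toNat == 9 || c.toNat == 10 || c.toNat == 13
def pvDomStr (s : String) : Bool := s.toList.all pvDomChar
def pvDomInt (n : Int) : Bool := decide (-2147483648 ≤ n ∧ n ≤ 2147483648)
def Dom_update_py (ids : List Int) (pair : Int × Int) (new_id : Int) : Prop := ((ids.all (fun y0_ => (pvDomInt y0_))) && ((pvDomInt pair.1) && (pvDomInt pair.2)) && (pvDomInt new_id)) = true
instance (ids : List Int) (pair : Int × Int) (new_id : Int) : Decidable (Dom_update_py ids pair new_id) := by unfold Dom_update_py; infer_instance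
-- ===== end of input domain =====

-- B replaces A's index/slice while-loop by a single flat pass carrying a one-element
-- pending buffer (objective: simpler); return value only, no mutation is observable.

-- ===== PORT A =====
-- while-loop of A: i is the scan index, acc the growing new_ids
def update_py_go (ids : List Int) (pair : Int × Int) (new_id : Int) (i : Nat) (acc : List Int) : List Int :=
  if h : i < ids.length then
    -- curr_pair = tuple(ids[i:i+2]); comparing with the 2-tuple `pair`
    let curr := PySem.List.slice ids (some (i : Int)) (some ((i : Int) + 2))
    if curr = [pair.1, pair.2] then
      update_py_go ids pair new_id (i + 2) (acc ++ [new_id])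
    else
      update_py_go ids pair new_id (i + 1) (acc ++ [ids[i]])
  else
    acc
termination_by ids.length - i

def update_py (ids : List Int) (pair : Int × Int) (new_id : Int) : List Int :=
  update_py_go ids pair new_id 0 []

-- ===== PORT B =====
-- loop body of B: state = (out, pend)
def update_py_alt_step (pair : Int × Int) (new_id : Int)
    (s : List Int × Option Int) (x : Int) : List Int × Option Int :=
  match s.2 with
  | none => (s.1, some x)
  | some p => if (p, x) = pair then (s.1 ++ [new_id], none) else (s.1 ++ [p], some x)

def update_py_alt (ids : List Int) (pair : Int × Int) (new_id : Int) : List Int :=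
  let r := ids.foldl (update_py_alt_step pair new_id) ([], none)
  match r.2 with
  | none => r.1
  | some p => r.1 ++ [p]

-- ===== PRECONDITION & SPEC =====
def Spec_update_py (ids : List Int) (pair : Int × Int) (new_id : Int) (out : List Int) : Prop := out = update_py_alt ids pair new_id
instance (ids : List Int) (pair : Int × Int) (new_id : Int) (out : List Int) : Decidable (Spec_update_py ids pair new_id out) := by unfold Spec_update_py; infer_instance

-- ===== CLAIM (what is proved, stated in full; the proofs are below) =====
def Claim_equal_update_py : Prop := ∀ (ids : List Int) (pair : Int × Int) (new_id : Int), Dom_update_py ids pair new_id → Spec_update_py ids pair new_id (update_py ids pair new_id)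

-- ===== LEMMAS AND PROOFS =====

-- reference merge function, recursion on the list structure
def pvMrg (pair : Int × Int) (new_id : Int) : List Int → List Int
  | [] => []
  | [x] => [x]
  | x :: y :: t =>
    if x = pair.1 ∧ y = pair.2 then new_id :: pvMrg pair new_id t
    else x :: pvMrg pair new_id (y :: t)

theorem update_py_go_eq (ids : List Int) (pair : Int × Int) (new_id : Int) :
    ∀ (n i : Nat) (acc : List Int), ids.length - i ≤ n →
      update_py_go ids pair new_id i acc = acc ++ pvMrg pair new_id (ids.drop i) := by
  intro n
  induction n with
  | zero =>
    intro i acc hn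
    have h : ¬ i < ids.length := by omega
    rw [update_py_go]
    have hnil : ids.drop i = [] := List.drop_eq_nil_of_le (by omega)
    simp [h, hnil, pvMrg]
  | succ n ih =>
    intro i acc hn
    rw [update_py_go]
    by_cases h : i < ids.length
    · simp only [h, dif_pos]
      have hdrop : ids.drop i = ids[i] :: ids.drop (i + 1) := List.drop_eq_getElem_cons h
      have hslice : PySem.List.slice ids (some (i : Int)) (some ((i : Int) + 2)) =
          (ids.drop i).take 2 := by
        have := PySem.List.slice_natCast_add (xs := ids) (j := i) (n := 2)
        simpa using this
      by_cases h2 : i + 1 < ids.length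
      · have hdrop2 : ids.drop (i + 1) = ids[i + 1] :: ids.drop (i + 2) :=
          List.drop_eq_getElem_cons h2
        have htake : (ids.drop i).take 2 = [ids[i], ids[i + 1]] := by
          rw [hdrop, hdrop2]; rfl
        by_cases hm : ids[i] = pair.1 ∧ ids[i + 1] = pair.2
        · have : PySem.List.slice ids (some (i : Int)) (some ((i : Int) + 2)) =
              [pair.1, pair.2] := by rw [hslice, htake, hm.1, hm.2]
          rw [if_pos this, ih (i + 2) (acc ++ [new_id]) (by omega)]
          rw [hdrop, hdrop2, pvMrg, if_pos hm]
          simp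
        · have hne : ¬ PySem.List.slice ids (some (i : Int)) (some ((i : Int) + 2)) =
              [pair.1, pair.2] := by
            rw [hslice, htake]; simp only [List.cons.injEq, and_true]; tauto
          rw [if_neg hne, ih (i + 1) (acc ++ [ids[i]]) (by omega)]
          rw [hdrop, hdrop2, pvMrg, if_neg hm]
          simp
      · have hnil : ids.drop (i + 1) = [] := List.drop_eq_nil_of_le (by omega)
        have htake : (ids.drop i).take 2 = [ids[i]] := by rw [hdrop, hnil]; rfl
        have hne : ¬ PySem.List.slice ids (some (i : Int)) (some ((i : Int) + 2)) =
            [pair.1, pair.2] := by rw [hslice, htake]; simp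
        rw [if_neg hne, ih (i + 1) (acc ++ [ids[i]]) (by omega)]
        rw [hdrop, hnil]
        simp [pvMrg]
    · have hnil : ids.drop i = [] := List.drop_eq_nil_of_le (by omega)
      simp [h, hnil, pvMrg]

-- finishing step of B
def pvFinish : List Int × Option Int → List Int
  | (out, none) => out
  | (out, some p) => out ++ [p]

def pvConsOpt : Option Int → List Int → List Int
  | none, l => l
  | some p, l => p :: l

theorem update_py_alt_fold (pair : Int × Int) (new_id : Int) :
    ∀ (l out : List Int) (pend : Option Int),
      pvFinish (l.foldl (update_py_alt_step pair new_id) (out, pend)) =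
        out ++ pvMrg pair new_id (pvConsOpt pend l) := by
  intro l
  induction l with
  | nil =>
    intro out pend
    cases pend with
    | none => simp [pvFinish, pvConsOpt, pvMrg]
    | some p => simp [pvFinish, pvConsOpt, pvMrg]
  | cons x t ih =>
    intro out pend
    cases pend with
    | none =>
      simp only [List.foldl_cons, update_py_alt_step]
      rw [ih]
      rfl
    | some p =>
      simp only [List.foldl_cons, update_py_alt_step]
      by_cases hm : p = pair.1 ∧ x = pair.2
      · have : (p, x) = pair := by rw [Prod.ext_iff]; exact hm
        rw [if_pos this, ih]
        simp [pvConsOpt, pvMrg, hm]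
      · have : ¬ (p, x) = pair := by rw [Prod.ext_iff]; exact hm
        rw [if_neg this, ih]
        simp [pvConsOpt, pvMrg, hm]

-- ===== VERDICT (by name: the statement is the Claim_ definition above) =====
theorem update_py_spec : Claim_equal_update_py := by
  intro ids pair new_id _
  unfold Spec_update_py update_py
  rw [update_py_go_eq ids pair new_id ids.length 0 [] (by omega)]
  have halt : update_py_alt ids pair new_id =
      pvFinish (ids.foldl (update_py_alt_step pair new_id) ([], none)) := by
    rcases hr : ids.foldl (update_py_alt_step pair new_id) ([], none) with ⟨out, pend⟩
    cases pend <;> simp [update_py_alt, pvFinish, hr]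
  rw [halt, update_py_alt_fold pair new_id ids [] none]
  simp [pvConsOpt]
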